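-- pv_equiv track=rewrite | github.com/hsuetsugu/atc | ABC152/D.py | calc
-- ===== SOURCE A (Python) =====
-- def calc(num):
--     s = list(str(num))[::-1]
--     s2 = int(s[-1])
--     s1 = int(s[0])
--
--     keta = 0
--     while True:
--         num = num // 10
--         keta += 1
--         if num == 0:
--             break
--
--     if s1 == s2:
--         if keta == 1:
--             return 1
--         elif keta == 2:
--             return 1 + 2
--         else:
--             ans = 0
--             for i in range(keta - 3):
--                 ans += (10 ** (i+1)) * 2
--             ans += (int(''.join(s[1:-1][::-1]))+1) * 2 + 3
--             return ans
--
--     elif s1 > s2: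
--         if keta == 2:
--             return 0
--         else:
--             ans = 0
--             for i in range(keta - 2):
--                 ans += 10 ** i
--             return ans * 2
--     else:
--         if s1 == 0:
--             return 0
--         else:
--             ans = 0
--             for i in range(keta - 1):
--                 ans += 10 ** i
--             return ans * 2
-- ===== SOURCE B (Python) =====
-- def calc(num):
--     s = str(num)
--     last = int(s[-1])
--     first = int(s[0])
--     keta = len(s)
--     if last == first:
--         if keta == 1:
--             return 1
--         if keta == 2:
--             return 3
--         return 2 * (10 ** (keta - 2) - 10) // 9 + (int(s[1:-1]) + 1) * 2 + 3
--     if last > first: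
--         if keta == 2:
--             return 0
--         return 2 * (10 ** (keta - 2) - 1) // 9
--     if last == 0:
--         return 0
--     return 2 * (10 ** (keta - 1) - 1) // 9
-- ===== Notes on version B (the rewrite author's own statement) =====
-- stated objective: simpler
-- what changed: Every accumulation loop is replaced by its exact geometric-series closed form, and the hand-rolled digit-counting while loop and reversed-list indexing are replaced by len(str(num)) and direct string indexing/slicing, so B is straight-line arithmetic with no loop at all.
import Mathlib
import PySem

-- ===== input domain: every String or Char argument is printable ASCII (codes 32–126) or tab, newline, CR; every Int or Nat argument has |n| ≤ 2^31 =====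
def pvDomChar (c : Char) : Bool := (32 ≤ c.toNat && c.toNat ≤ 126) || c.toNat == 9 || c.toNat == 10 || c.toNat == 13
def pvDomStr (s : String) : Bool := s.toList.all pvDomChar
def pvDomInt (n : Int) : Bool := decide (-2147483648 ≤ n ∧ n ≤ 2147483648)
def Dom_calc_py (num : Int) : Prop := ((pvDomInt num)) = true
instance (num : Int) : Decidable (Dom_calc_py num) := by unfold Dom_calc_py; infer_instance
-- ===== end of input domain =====

-- B replaces A's digit-counting while loop by len(str(num)), the reversed-list indexing by direct
-- string indexing/slicing, and every accumulation loop by its geometric-series closed form.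

-- ===== PORT A =====
-- the 'while True: num = num // 10; keta += 1; if num == 0: break' loop; fuel only makes it total
-- (for 0 ≤ num the loop runs at most num+1 times, so fuel num.toNat+1 is never exhausted)
def ketaLoop (num keta : Int) : Nat → Int
  | 0 => keta
  | fuel + 1 =>
    let num' := PySem.Int.floordiv num 10
    let keta' := keta + 1
    if num' = 0 then keta' else ketaLoop num' keta' fuel

def calc_py (num : Int) : Int :=
  -- s = list(str(num))[::-1]  ([::-1] is reverse, PySem.List.slice?_none_none_neg_one)
  let s := (PySem.Int.toChars num).reverse
  -- s2 = int(s[-1]); s1 = int(s[0]) — int() of a one-character string; 0 marks the raising case (outside Pre_)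
  let s2 := match PySem.List.pyGet? s (-1) with
    | some c => (PySem.Int.ofChars? [c]).getD 0
    | none => 0
  let s1 := match PySem.List.pyGet? s 0 with
    | some c => (PySem.Int.ofChars? [c]).getD 0
    | none => 0
  let keta := ketaLoop num 0 (num.toNat + 1)
  if s1 = s2 then
    if keta = 1 then 1
    else if keta = 2 then 1 + 2
    else
      -- for i in range(keta-3): ans += (10**(i+1))*2
      let ans := (PySem.List.pyRange 0 (keta - 3)).foldl (fun ans i => ans + 10 ^ (i + 1).toNat * 2) 0
      -- ''.join(s[1:-1][::-1]) joins one-character strings: it is the char list itself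
      -- (PySem.Chars.join_nil_singletons); [::-1] is reverse
      let mid := (PySem.Int.ofChars? ((PySem.List.slice s (some 1) (some (-1))).reverse)).getD 0
      ans + (mid + 1) * 2 + 3
  else if s1 > s2 then
    if keta = 2 then 0
    else
      -- for i in range(keta-2): ans += 10 ** i
      ((PySem.List.pyRange 0 (keta - 2)).foldl (fun ans i => ans + 10 ^ i.toNat) 0) * 2
  else
    if s1 = 0 then 0
    else
      -- for i in range(keta-1): ans += 10 ** i
      ((PySem.List.pyRange 0 (keta - 1)).foldl (fun ans i => ans + 10 ^ i.toNat) 0) * 2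

-- ===== PORT B =====
def calc_py_alt (num : Int) : Int :=
  let s := PySem.Int.toStr num
  -- last = int(s[-1]); first = int(s[0]); 0 marks the raising case (outside Pre_)
  let last := match PySem.Str.pyGet? s (-1) with
    | some c => (PySem.Int.ofChars? [c]).getD 0
    | none => 0
  let first := match PySem.Str.pyGet? s 0 with
    | some c => (PySem.Int.ofChars? [c]).getD 0
    | none => 0
  let keta := PySem.Str.len s
  if last = first then
    if keta = 1 then 1
    else if keta = 2 then 3
    else
      PySem.Int.floordiv (2 * (10 ^ (keta - 2).toNat - 10)) 9
        + ((PySem.Int.ofStr? (PySem.Str.slice s (some 1) (some (-1)))).getD 0 + 1) * 2 + 3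
  else if last > first then
    if keta = 2 then 0
    else PySem.Int.floordiv (2 * (10 ^ (keta - 2).toNat - 1)) 9
  else
    if last = 0 then 0
    else PySem.Int.floordiv (2 * (10 ^ (keta - 1).toNat - 1)) 9

-- ===== PRECONDITION & SPEC =====
-- Pre_ excludes exactly the negative inputs: there str(num) starts with '-' and A raises ValueError at int(s[-1]).
def Pre_calc_py (num : Int) : Prop := 0 ≤ num
instance (num : Int) : Decidable (Pre_calc_py num) := by unfold Pre_calc_py; infer_instance
def pvWitness_calc_py : Int := (242)

def Spec_calc_py (num : Int) (out : Int) : Prop := out = calc_py_alt num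
instance (num : Int) (out : Int) : Decidable (Spec_calc_py num out) := by unfold Spec_calc_py; infer_instance

-- ===== CLAIM (what is proved, stated in full; the proofs are below) =====
def Claim_equal_calc_py : Prop := ∀ (num : Int), Dom_calc_py num → Pre_calc_py num → Spec_calc_py num (calc_py num)

-- ===== LEMMAS AND PROOFS =====

-- reference digit count
def digCount : Nat → Nat
  | n => if h : n < 10 then 1 else digCount (n / 10) + 1
decreasing_by exact Nat.div_lt_self (by omega) (by omega)

lemma digCount_le (n : Nat) : digCount n ≤ n + 1 := by
  induction n using Nat.strong_induction_on with
  | _ n ih =>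
    rw [digCount]
    split
    · omega
    · have h10 : ¬ n < 10 := by assumption
      have := ih (n / 10) (Nat.div_lt_self (by omega) (by omega))
      have : n / 10 + 1 ≤ n := by omega
      omega

lemma ketaLoop_eq (n : Nat) : ∀ (fuel : Nat) (acc : Int), digCount n ≤ fuel →
    ketaLoop (n : Int) acc fuel = acc + digCount n := by
  induction n using Nat.strong_induction_on with
  | _ n ih =>
    intro fuel acc hf
    have hd1 : 1 ≤ digCount n := by rw [digCount]; split <;> omega
    obtain ⟨f, rfl⟩ : ∃ f, fuel = f + 1 := ⟨fuel - 1, by omega⟩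
    rw [ketaLoop]
    have hfd : PySem.Int.floordiv (n : Int) 10 = ((n / 10 : Nat) : Int) := by
      exact_mod_cast PySem.Int.floordiv_natCast n 10
    rw [hfd]
    by_cases h : n < 10
    · have : n / 10 = 0 := by omega
      rw [this]
      norm_num
      rw [digCount]
      simp [h]
    · have hne : ((n / 10 : Nat) : Int) ≠ 0 := by
        have : 1 ≤ n / 10 := by omega
        exact_mod_cast by omega
      rw [if_neg hne]
      have hdc : digCount n = digCount (n / 10) + 1 := by rw [digCount]; simp [h]
      rw [ih (n / 10) (Nat.div_lt_self (by omega) (by omega)) f (acc + 1) (by omega)]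
      omega

lemma toDigitsCore_len (n : Nat) : ∀ (f : Nat), n ≤ f →
    (Nat.toDigitsCore 10 (f + 1) n []).length = digCount n := by
  induction n using Nat.strong_induction_on with
  | _ n ih =>
    intro f hf
    rw [Nat.toDigitsCore]
    by_cases h : n < 10
    · have h0 : n / 10 = 0 := by omega
      simp [h0, digCount, h]
    · have h0 : ¬ n / 10 = 0 := by omega
      simp only [h0, if_false]
      obtain ⟨g, rfl⟩ : ∃ g, f = g + 1 := ⟨f - 1, by omega⟩
      rw [Nat.toDigitsCore_lens_eq]
      rw [ih (n / 10) (Nat.div_lt_self (by omega) (by omega)) g (by omega)]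
      conv_rhs => rw [digCount]
      simp [h]

lemma toChars_len (num : Int) (h : 0 ≤ num) :
    (PySem.Int.toChars num).length = digCount num.toNat := by
  unfold PySem.Int.toChars
  rw [if_neg (by omega)]
  unfold Nat.toDigits
  exact toDigitsCore_len num.toNat num.toNat (le_refl _)

lemma keta_eq (num : Int) (h : 0 ≤ num) :
    ketaLoop num 0 (num.toNat + 1) = ((PySem.Int.toChars num).length : Int) := by
  have hn : num = (num.toNat : Int) := by omega
  rw [toChars_len num h]
  conv_lhs => rw [hn]
  rw [Int.toNat_natCast, ketaLoop_eq num.toNat (num.toNat + 1) 0 (by have := digCount_le num.toNat; omega)]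
  omega

lemma digCount_pos (n : Nat) : 1 ≤ digCount n := by
  rw [digCount]; split <;> omega

lemma geo_sum (k : Nat) : 9 * ((List.range k).map (fun j => (10:Int) ^ j)).sum = 10 ^ k - 1 := by
  induction k with
  | zero => simp
  | succ n ih =>
    rw [List.range_succ, List.map_append, List.sum_append]
    simp only [List.map_cons, List.map_nil, List.sum_cons, List.sum_nil]
    rw [pow_succ]
    linarith

-- the loop 'for i in range(k): ans += 10 ** i' computes (10^k - 1) / 9
lemma foldl_geo (k : Nat) :
    9 * (PySem.List.pyRange 0 (k : Int)).foldl (fun ans i => ans + (10:Int) ^ i.toNat) (0:Int) = 10 ^ k - 1 := by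
  simp only [PySem.List.foldl_add]
  rw [PySem.List.pyRange_zero_natCast, List.map_map]
  have h : (List.map ((fun i : Int => (10:Int) ^ i.toNat) ∘ fun j : Nat => (j : Int)) (List.range k))
      = (List.range k).map (fun j => (10:Int) ^ j) := by
    simp [Function.comp_def]
  rw [h]
  have := geo_sum k
  linarith

-- the loop 'for i in range(k): ans += (10 ** (i+1)) * 2' computes 2 * (10^(k+1) - 10) / 9
lemma foldl_geo2 (k : Nat) :
    9 * (PySem.List.pyRange 0 (k : Int)).foldl (fun ans i => ans + (10:Int) ^ (i + 1).toNat * 2) (0:Int)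
      = 2 * (10 ^ (k + 1) - 10) := by
  simp only [PySem.List.foldl_add]
  rw [PySem.List.pyRange_zero_natCast, List.map_map]
  have h : (List.map ((fun i : Int => (10:Int) ^ (i + 1).toNat * 2) ∘ fun j : Nat => (j : Int)) (List.range k))
      = (List.range k).map (fun j => (10:Int) ^ j * 20) := by
    simp only [Function.comp_def]
    apply List.map_congr_left
    intro j hj
    have hh : ((j : Int) + 1).toNat = j + 1 := by omega
    rw [hh, pow_succ]
    ring
  rw [h]
  have h2 : ((List.range k).map (fun j => (10:Int) ^ j * 20)).sum
      = ((List.range k).map (fun j => (10:Int) ^ j)).sum * 20 := by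
    rw [← List.sum_map_mul_right]
  have := geo_sum k
  rw [h2]
  have hp : (10:Int) ^ (k+1) = 10 ^ k * 10 := pow_succ 10 k
  linarith

-- s[1:-1] of the reversed list, reversed back, is s[1:-1] of the original list
lemma slice_reverse (t : List Char) :
    (PySem.List.slice t.reverse (some 1) (some (-1))).reverse = PySem.List.slice t (some 1) (some (-1)) := by
  simp only [PySem.List.slice, PySem.List.clampIdx_neg_one, List.length_reverse]
  norm_num [PySem.List.clampIdx]
  rcases t with _ | ⟨c, t'⟩
  · simp
  · have h1 : min 1 (c :: t').length = 1 := by simp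
    rw [h1, List.drop_reverse, List.take_reverse, List.reverse_reverse, List.length_take,
      List.drop_take]
    set n := (c :: t').length with hn
    have hn1 : 1 ≤ n := by rw [hn]; simp
    by_cases h2 : n = 1
    · simp [h2]
    · have e1 : min (n - 1) n - (n - 1 - 1) = 1 := by omega
      have e2 : n - 1 - 1 = n - 2 := by omega
      rw [e1, e2]

-- ===== VERDICT (by name: the statement is the Claim_ definition above) =====
theorem calc_py_spec : Claim_equal_calc_py := by
  intro num hdom hpre
  unfold Spec_calc_py
  have hpre' : (0:Int) ≤ num := hpre
  simp only [calc_py, calc_py_alt, PySem.Int.toStr, PySem.Str.pyGet?, PySem.Str.len,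
    PySem.Int.ofStr?, String.toList_ofList, PySem.Chars.pyGet?_eq_listPyGet?,
    PySem.Str.toList_slice, PySem.Chars.slice_eq_listSlice,
    PySem.List.pyGet?_zero, PySem.List.pyGet?_neg_one, List.getLast?_reverse,
    List.head?_reverse, ← List.head?_eq_getElem?, keta_eq num hpre', slice_reverse]
  have hL1 : 1 ≤ (PySem.Int.toChars num).length := by
    rw [toChars_len num hpre']; exact digCount_pos _
  set t := PySem.Int.toChars num with ht
  set a := (match t.getLast? with | some c => (PySem.Int.ofChars? [c]).getD 0 | none => 0) with ha
  set b := (match t.head? with | some c => (PySem.Int.ofChars? [c]).getD 0 | none => 0) with hb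
  have hab1 : t.length = 1 → a = b := by
    intro h
    obtain ⟨c, hc⟩ := List.length_eq_one_iff.mp h
    rw [ha, hb, hc]
    simp
  split_ifs with h1 h2 h3 h4 h5 h6
  · rfl
  · norm_num
  · -- middle branch of s1 == s2 : loop vs closed form
    have hL3 : 3 ≤ t.length := by omega
    rw [show ((t.length : Int) - 3) = ((t.length - 3 : Nat) : Int) by omega]
    rw [show ((t.length : Int) - 2).toNat = t.length - 2 by omega]
    have hg := foldl_geo2 (t.length - 3)
    rw [show t.length - 3 + 1 = t.length - 2 by omega] at hg
    have hf : PySem.Int.floordiv (2 * ((10:Int) ^ (t.length - 2) - 10)) 9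
        = (PySem.List.pyRange 0 ((t.length - 3 : Nat) : Int)).foldl
            (fun ans i => ans + (10:Int) ^ (i + 1).toNat * 2) (0:Int) := by
      rw [← hg, PySem.Int.floordiv_eq_ediv_of_pos (by norm_num),
        Int.mul_ediv_cancel_left _ (by norm_num : (9:Int) ≠ 0)]
    rw [hf]
  · rfl
  · -- s1 > s2, keta != 2 : loop vs closed form
    have hLn1 : t.length ≠ 1 := fun h => h1 (hab1 h)
    have hL2 : 2 ≤ t.length := by omega
    rw [show ((t.length : Int) - 2) = ((t.length - 2 : Nat) : Int) by omega]
    rw [Int.toNat_natCast]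
    have hg := foldl_geo (t.length - 2)
    rw [← hg, PySem.Int.floordiv_eq_ediv_of_pos (by norm_num), mul_left_comm,
      Int.mul_ediv_cancel_left _ (by norm_num : (9:Int) ≠ 0)]
    ring
  · rfl
  · -- s1 < s2, s1 != 0 : loop vs closed form
    rw [show ((t.length : Int) - 1) = ((t.length - 1 : Nat) : Int) by omega]
    rw [Int.toNat_natCast]
    have hg := foldl_geo (t.length - 1)
    rw [← hg, PySem.Int.floordiv_eq_ediv_of_pos (by norm_num), mul_left_comm,
      Int.mul_ediv_cancel_left _ (by norm_num : (9:Int) ≠ 0)]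
    ring
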